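-- pv_equiv track=rewrite | github.com/HarryZhao2000/groupwork03 | Homework/FinalProject/__main__.py | CommitCutter
-- ===== SOURCE A (Python) =====
-- def CommitCutter(data):
--     l=[]    #Store the large character of each commit
--     length=6    #"commit" character length is 6
--     count=0
--     a=True  #Determine whether there is no next commit, that is, whether all commit characters have been found
--     #Divide by "commit"
--     while a:
--         num=data.find("commit ",count)
--         if num==-1:
--             a=False #There is no next commit. Exit the loop
--         else:
--             l.append(num)
--             count=num+length    #l stores the digital subscript of "commit"
--     i=0
--     com=[]
--     while i < len(l)-1:
--         com.append(data[l[i]:l[i+1]])   #The middle part of the front and back corner marks is the information of each commit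
--         i+=1
--     return com
-- ===== SOURCE B (Python) =====
-- def CommitCutter(data):
--     parts = data.split("commit ")
--     return ["commit " + p for p in parts[1:-1]]
-- ===== Notes on version B (the rewrite author's own statement) =====
-- stated objective: simpler
-- what changed: Replaces the manual find-loop that collects match indices plus a second index-pair slicing loop with a single str.split('commit ') followed by re-prepending the delimiter to the inner parts (parts[1:-1]), which drops the text before the first marker and the last commit exactly as A does.
import Mathlib
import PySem

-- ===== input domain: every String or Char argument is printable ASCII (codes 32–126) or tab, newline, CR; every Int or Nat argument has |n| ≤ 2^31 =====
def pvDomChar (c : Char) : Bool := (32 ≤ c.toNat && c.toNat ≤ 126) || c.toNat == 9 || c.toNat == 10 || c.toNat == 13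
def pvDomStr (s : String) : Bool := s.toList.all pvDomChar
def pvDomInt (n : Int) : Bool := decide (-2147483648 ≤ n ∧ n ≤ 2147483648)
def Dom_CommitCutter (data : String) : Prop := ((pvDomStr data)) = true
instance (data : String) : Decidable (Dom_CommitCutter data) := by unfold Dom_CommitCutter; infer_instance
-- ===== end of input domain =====

-- B replaces A's two loops (index collection via repeated str.find, then index-pair slicing) by one
-- str.split('commit ') whose inner parts ([1:-1]) get the delimiter re-prepended; objective: simpler.


-- ===== PORT A =====
-- the literal "commit " (A's search pattern)
def pvPatA : List Char := ['c', 'o', 'm', 'm', 'i', 't', ' ']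

-- A's first while-loop: num = data.find("commit ", count); l.append(num); count = num + 6.
-- The loop runs at most (number of occurrences + 1) ≤ len+1 times, so fuel len+1 is never exhausted.
def cutLoopA (ds : List Char) (count : Int) (fuel : Nat) : List Int :=
  match fuel with
  | 0 => []
  | Nat.succ fuel =>
    let num := PySem.Chars.findFrom ds pvPatA count
    if num = -1 then [] else num :: cutLoopA ds (num + 6) fuel

-- A's second while-loop: while i < len(l)-1: com.append(data[l[i]:l[i+1]]); i += 1
def buildComA (ds : List Char) : List Int → List String
  | a :: b :: rest =>
      String.ofList (PySem.Chars.slice ds (some a) (some b)) :: buildComA ds (b :: rest)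
  | _ => []

def CommitCutter (data : String) : List String :=
  buildComA data.toList (cutLoopA data.toList 0 (data.toList.length + 1))

-- ===== PORT B =====
-- the literal "commit " (B's separator)
def pvPatB : List Char := ['c', 'o', 'm', 'm', 'i', 't', ' ']

-- B: parts = data.split("commit "); return ["commit " + p for p in parts[1:-1]]
def CommitCutter_alt (data : String) : List String :=
  (PySem.List.slice (PySem.Chars.splitOn data.toList pvPatB) (some 1) (some (-1))).map
    (fun p => String.ofList (pvPatB ++ p))

-- ===== PRECONDITION & SPEC =====
def Spec_CommitCutter (data : String) (out : List String) : Prop := out = CommitCutter_alt data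
instance (data : String) (out : List String) : Decidable (Spec_CommitCutter data out) := by unfold Spec_CommitCutter; infer_instance

-- ===== CLAIM (what is proved, stated in full; the proofs are below) =====
def Claim_equal_CommitCutter : Prop := ∀ (data : String), Dom_CommitCutter data → Spec_CommitCutter data (CommitCutter data)

-- ===== LEMMAS AND PROOFS =====

-- apply f to the head of a list, keep the tail
def mapHead (f : List Char → List Char) : List (List Char) → List (List Char)
  | [] => []
  | x :: xs => f x :: xs

-- the pieces of ds split on "commit " (the clean recursion both ports reduce to)
def pieces (ds : List Char) : List (List Char) :=
  match ds with
  | [] => [[]]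
  | c :: rest =>
    if pvPatA.isPrefixOf (c :: rest) then [] :: pieces ((c :: rest).drop 7)
    else mapHead (fun x => c :: x) (pieces rest)
  termination_by ds.length
  decreasing_by all_goals (simp; try omega)

-- all "commit " occurrence start positions in ds, in increasing order
def occs (ds : List Char) : List Nat :=
  if h : PySem.Chars.find ds pvPatA = -1 then []
  else
    let nn := (PySem.Chars.find ds pvPatA).toNat
    nn :: (occs (ds.drop (nn + 7))).map (· + (nn + 7))
  termination_by ds.length
  decreasing_by
    have h0 : (0 : Int) ≤ PySem.Chars.find ds pvPatA := by
      have := PySem.Chars.neg_one_le_find ds pvPatA; omega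
    have hp := (PySem.Chars.find_spec (s := ds) (sub := pvPatA) h0).1
    have hl := hp.length_le
    simp [pvPatA] at hl
    simp
    omega

theorem pieces_ne_nil (ds : List Char) : pieces ds ≠ [] := by
  induction ds using pieces.induct with
  | case1 => simp [pieces]
  | case2 c rest h ih => simp [pieces, h]
  | case3 c rest h ih =>
    rw [pieces]; simp [h]
    cases hp : pieces rest with
    | nil => exact absurd hp ih
    | cons x xs => simp [mapHead]

theorem pieces_of_not_infix (ds : List Char) (h : ¬ pvPatA <:+: ds) : pieces ds = [ds] := by
  induction ds using pieces.induct with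
  | case1 => simp [pieces]
  | case2 c rest hpre ih =>
    exact absurd (List.infix_cons_iff.mpr (Or.inl (List.isPrefixOf_iff_prefix.mp hpre))) h
  | case3 c rest hpre ih =>
    rw [pieces]; simp [hpre]
    rw [ih (fun hi => h (List.infix_cons_iff.mpr (Or.inr hi)))]
    simp [mapHead]

theorem pieces_occ (n : Nat) (ds : List Char)
    (h1 : pvPatA <+: ds.drop n) (h2 : ∀ i < n, ¬ pvPatA <+: ds.drop i) :
    pieces ds = ds.take n :: pieces (ds.drop (n + 7)) := by
  induction n generalizing ds with
  | zero =>
    cases ds with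
    | nil => simp [pvPatA] at h1
    | cons c rest =>
      rw [pieces]
      simp only [List.drop_zero] at h1
      simp [List.isPrefixOf_iff_prefix.mpr h1]
  | succ n ih =>
    cases ds with
    | nil => simp [pvPatA] at h1
    | cons c rest =>
      have hnp : ¬ pvPatA.isPrefixOf (c :: rest) := by
        rw [List.isPrefixOf_iff_prefix]
        simpa using h2 0 (by omega)
      rw [pieces]
      simp only [hnp]
      rw [ih rest (by simpa using h1) (fun i hi => by simpa using h2 (i + 1) (by omega))]
      simp [mapHead]

theorem find_eq_of_first (t sub : List Char) (j : Nat)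
    (h1 : sub <+: t.drop j) (h2 : ∀ i < j, ¬ sub <+: t.drop i) :
    PySem.Chars.find t sub = j := by
  have hinf : sub <:+: t := by
    obtain ⟨r, hr⟩ := h1
    exact ⟨t.take j, r, by rw [List.append_assoc, hr, List.take_append_drop]⟩
  have hne : PySem.Chars.find t sub ≠ -1 := (PySem.Chars.find_ne_neg_one_iff t sub).mpr hinf
  have hge : (0:Int) ≤ PySem.Chars.find t sub := by
    have := PySem.Chars.neg_one_le_find t sub; omega
  obtain ⟨hp, hmin⟩ := PySem.Chars.find_spec (s := t) (sub := sub) hge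
  have : (PySem.Chars.find t sub).toNat = j := by
    rcases Nat.lt_trichotomy (PySem.Chars.find t sub).toNat j with h | h | h
    · exact absurd hp (h2 _ h)
    · exact h
    · exact absurd h1 (hmin j h)
  omega

theorem find_cons_of_not_prefix (t : List Char) (x : Char) (sub : List Char)
    (h : ¬ sub <+: (x :: t)) :
    PySem.Chars.find (x :: t) sub =
      if PySem.Chars.find t sub = -1 then -1 else PySem.Chars.find t sub + 1 := by
  by_cases hf : PySem.Chars.find t sub = -1
  · simp only [hf, if_true]
    rw [PySem.Chars.find_eq_neg_one_iff] at hf ⊢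
    intro hinf
    rcases List.infix_cons_iff.mp hinf with hpre | hinf'
    · exact h hpre
    · exact hf hinf'
  · simp only [hf, if_false]
    have hge : (0:Int) ≤ PySem.Chars.find t sub := by
      have := PySem.Chars.neg_one_le_find t sub; omega
    obtain ⟨hp, hmin⟩ := PySem.Chars.find_spec (s := t) (sub := sub) hge
    have := find_eq_of_first (x :: t) sub ((PySem.Chars.find t sub).toNat + 1)
      (by simpa using hp)
      (by
        intro i hi
        cases i with
        | zero => simpa using h
        | succ i' => simpa using hmin i' (by omega))
    omega

theorem findFrom_six_eq_seven (ds : List Char) (nn : Nat)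
    (hlen : nn + 7 ≤ ds.length) (hp : pvPatA <+: ds.drop nn) :
    PySem.Chars.findFrom ds pvPatA (nn + 6 : Nat) = PySem.Chars.findFrom ds pvPatA (nn + 7 : Nat) := by
  rw [PySem.Chars.findFrom_natCast ds pvPatA (nn + 6) (by omega),
      PySem.Chars.findFrom_natCast ds pvPatA (nn + 7) hlen]
  have h6 : nn + 6 < ds.length := by omega
  have hdrop : ds.drop (nn + 6) = ds[nn + 6] :: ds.drop (nn + 7) := List.drop_eq_getElem_cons h6
  have hsp : ds[nn + 6]'h6 = ' ' := by
    have hg := hp.getElem (i := 6) (by simp [pvPatA])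
    rw [List.getElem_drop] at hg
    simpa [pvPatA] using hg.symm
  have hnp : ¬ pvPatA <+: ds.drop (nn + 6) := by
    rw [hdrop, hsp]
    intro hc
    have := (List.cons_prefix_cons.mp hc).1
    simp at this
  rw [hdrop] at hnp ⊢
  rw [find_cons_of_not_prefix _ _ _ hnp]
  by_cases hf : PySem.Chars.find (ds.drop (nn + 7)) pvPatA = -1
  · simp [hf]
  · have hm1 := PySem.Chars.neg_one_le_find (ds.drop (nn + 7)) pvPatA
    rw [if_neg (by omega)]
    rw [if_neg (by omega)]
    push_cast
    omega

theorem cutLoopA_congr (ds : List Char) (c1 c2 : Int) (fuel : Nat)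
    (h : PySem.Chars.findFrom ds pvPatA c1 = PySem.Chars.findFrom ds pvPatA c2) :
    cutLoopA ds c1 fuel = cutLoopA ds c2 fuel := by
  cases fuel with
  | zero => rfl
  | succ f => simp [cutLoopA, h]

theorem cutLoopA_shift (fuel : Nat) (ds : List Char) (j k : Nat) (h : j + k ≤ ds.length) :
    cutLoopA ds ((j + k : Nat) : Int) fuel =
      (cutLoopA (ds.drop j) (k : Int) fuel).map (· + (j : Int)) := by
  induction fuel generalizing k with
  | zero => rfl
  | succ F ih =>
    have e1 := PySem.Chars.findFrom_natCast ds pvPatA (j + k) h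
    have e2 := PySem.Chars.findFrom_natCast (ds.drop j) pvPatA k (by simp; omega)
    rw [List.drop_drop] at e2
    simp only [cutLoopA]
    rw [e1, e2]
    by_cases hf : PySem.Chars.find (List.drop (j + k) ds) pvPatA = -1
    · simp [hf]
    · have hge : (0:Int) ≤ PySem.Chars.find (List.drop (j + k) ds) pvPatA := by
        have := PySem.Chars.neg_one_le_find (List.drop (j + k) ds) pvPatA; omega
      set f := PySem.Chars.find (List.drop (j + k) ds) pvPatA with hfdef
      have hp := (PySem.Chars.find_spec (s := List.drop (j + k) ds) (sub := pvPatA) hge).1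
      have hpl := hp.length_le
      have h7 : pvPatA.length = 7 := rfl
      rw [h7, List.length_drop, List.length_drop] at hpl
      have hJK : j + (k + f.toNat + 6) ≤ ds.length := by omega
      simp only [hf, if_false]
      have hL : ¬ ((j + k : Nat) : Int) + f = -1 := by push_cast; omega
      have hR : ¬ ((k : Nat) : Int) + f = -1 := by omega
      rw [if_neg hL, if_neg hR]
      simp only [List.map_cons]
      congr 1
      · push_cast; omega
      · rw [show ((j + k : Nat) : Int) + f + 6 = ((j + (k + f.toNat + 6) : Nat) : Int) from by push_cast; omega,
            show ((k : Nat) : Int) + f + 6 = ((k + f.toNat + 6 : Nat) : Int) from by push_cast; omega,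
            ih (k + f.toNat + 6) hJK]

theorem cutLoopA_eq_occs (fuel : Nat) (ds : List Char) (h : ds.length < fuel) :
    cutLoopA ds 0 fuel = (occs ds).map (Nat.cast : Nat → Int) := by
  induction fuel generalizing ds with
  | zero => omega
  | succ F ih =>
    by_cases hf : PySem.Chars.find ds pvPatA = -1
    · rw [occs]
      simp [cutLoopA, PySem.Chars.findFrom_zero, hf]
    · have hge : (0:Int) ≤ PySem.Chars.find ds pvPatA := by
        have := PySem.Chars.neg_one_le_find ds pvPatA; omega
      set nn := (PySem.Chars.find ds pvPatA).toNat with hnndef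
      have hnn : PySem.Chars.find ds pvPatA = (nn : Int) := by omega
      have hp := (PySem.Chars.find_spec (s := ds) (sub := pvPatA) hge).1
      have hpl := hp.length_le
      have h7 : pvPatA.length = 7 := rfl
      rw [h7, List.length_drop] at hpl
      have hlen : nn + 7 ≤ ds.length := by omega
      simp only [cutLoopA, PySem.Chars.findFrom_zero, hf, if_false]
      rw [hnn,
          show ((nn : Nat) : Int) + 6 = ((nn + 6 : Nat) : Int) from by push_cast; ring,
          cutLoopA_congr ds _ _ F (findFrom_six_eq_seven ds nn hlen (by rwa [hnn, Int.toNat_natCast] at hp)),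
          show ((nn + 7 : Nat) : Int) = ((nn + 7 + 0 : Nat) : Int) from by norm_num,
          cutLoopA_shift F ds (nn + 7) 0 (by omega),
          show ((0 : Nat) : Int) = (0 : Int) from rfl,
          ih (ds.drop (nn + 7)) (by rw [List.length_drop]; omega)]
      conv_rhs => rw [occs]
      rw [dif_neg hf]
      simp only [List.map_cons, List.map_map, ← hnndef]
      congr 1

theorem slice_one_neg_one {α : Type} (x : α) (xs : List α) :
    PySem.List.slice (x :: xs) (some 1) (some (-1)) = xs.dropLast := by
  simp [PySem.List.slice, PySem.List.clampIdx, List.dropLast_eq_take]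
  split_ifs <;> omega

theorem buildComA_shift (ds : List Char) (j : Nat) (L : List Nat) :
    buildComA ds (L.map (fun x => ((x + j : Nat) : Int))) =
      buildComA (ds.drop j) (L.map (Nat.cast : Nat → Int)) := by
  induction L with
  | nil => rfl
  | cons a L ih =>
    cases L with
    | nil => rfl
    | cons b r =>
      simp only [List.map_cons, buildComA]
      simp only [List.map_cons] at ih
      rw [ih]
      congr 1
      apply congrArg
      simp only [PySem.Chars.slice_eq_listSlice, PySem.List.slice_natCast]
      rw [List.drop_drop]
      congr 1
      · omega
      · congr 1
        omega

theorem splitOn_go_eq (fuel : Nat) (l cur : List Char) (acc : List (List Char))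
    (h : l.length < fuel) :
    PySem.Chars.splitOn.go pvPatA fuel l cur acc =
      acc.reverse ++ mapHead (cur.reverse ++ ·) (pieces l) := by
  induction fuel generalizing l cur acc with
  | zero => omega
  | succ F ih =>
    cases l with
    | nil => simp [PySem.Chars.splitOn.go, pieces, mapHead]
    | cons c rest =>
      by_cases hpre : pvPatA.isPrefixOf (c :: rest)
      · rw [PySem.Chars.splitOn.go]
        simp only [hpre, if_true]
        have hlen7 : pvPatA.length = 7 := rfl
        rw [hlen7, ih ((c :: rest).drop 7) [] (cur.reverse :: acc) (by simp at h ⊢; omega)]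
        rw [pieces]
        simp only [hpre, if_true]
        cases hps : pieces ((c :: rest).drop 7) with
        | nil => exact absurd hps (pieces_ne_nil _)
        | cons x xs => simp [mapHead]
      · rw [PySem.Chars.splitOn.go]
        simp only [hpre]
        rw [ih rest (c :: cur) acc (by simp at h ⊢; omega)]
        rw [pieces]
        simp only [hpre]
        cases hps : pieces rest with
        | nil => simp [mapHead]
        | cons x xs => simp [mapHead]

theorem splitOn_eq_pieces (ds : List Char) : PySem.Chars.splitOn ds pvPatA = pieces ds := by
  rw [show PySem.Chars.splitOn ds pvPatA = PySem.Chars.splitOn.go pvPatA (ds.length + 1) ds [] [] from rfl,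
      splitOn_go_eq (ds.length + 1) ds [] [] (by omega)]
  cases hps : pieces ds with
  | nil => exact absurd hps (pieces_ne_nil _)
  | cons x xs => simp [mapHead]

theorem main_aux (N : Nat) : ∀ ds : List Char, ds.length ≤ N →
    buildComA ds ((occs ds).map (Nat.cast : Nat → Int)) =
      (PySem.List.slice (pieces ds) (some 1) (some (-1))).map (fun p => String.ofList (pvPatA ++ p)) := by
  induction N with
  | zero =>
    intro ds hds
    have hnil : ds = [] := List.eq_nil_of_length_eq_zero (by omega)
    subst hnil
    have hfnil : PySem.Chars.find [] pvPatA = -1 := by decide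
    rw [occs]
    simp [hfnil, pieces, slice_one_neg_one, buildComA]
  | succ N ihN =>
    intro ds hds
    by_cases hf : PySem.Chars.find ds pvPatA = -1
    · rw [occs]
      simp only [hf, dif_pos, List.map_nil]
      rw [pieces_of_not_infix ds ((PySem.Chars.find_eq_neg_one_iff ds pvPatA).mp hf),
          slice_one_neg_one]
      rfl
    · have hge : (0:Int) ≤ PySem.Chars.find ds pvPatA := by
        have := PySem.Chars.neg_one_le_find ds pvPatA; omega
      obtain ⟨hp, hmin⟩ := PySem.Chars.find_spec (s := ds) (sub := pvPatA) hge
      set nn := (PySem.Chars.find ds pvPatA).toNat with hnndef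
      have hpl := hp.length_le
      have h7 : pvPatA.length = 7 := rfl
      rw [h7, List.length_drop] at hpl
      have hlen : nn + 7 ≤ ds.length := by omega
      set rest := ds.drop (nn + 7) with hrestdef
      have hpieces : pieces ds = ds.take nn :: pieces rest :=
        pieces_occ nn ds hp (fun i hi => hmin i hi)
      have hdropPat : ds.drop nn = pvPatA ++ rest := by
        obtain ⟨r, hr⟩ := hp
        have hrr : rest = r := by
          have h2 := congrArg (List.drop 7) hr
          rw [List.drop_drop] at h2
          rw [hrestdef, ← h2, ← h7, List.drop_left]
        rw [hrr, hr]
      have hrestlen : rest.length ≤ N := by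
        rw [hrestdef, List.length_drop]; omega
      rw [occs, dif_neg hf]
      simp only [← hnndef, List.map_cons, List.map_map]
      rw [hpieces, slice_one_neg_one]
      by_cases hfr : PySem.Chars.find rest pvPatA = -1
      · rw [show occs rest = [] from by rw [occs]; simp [hfr]]
        rw [pieces_of_not_infix rest ((PySem.Chars.find_eq_neg_one_iff rest pvPatA).mp hfr)]
        rfl
      · have hger : (0:Int) ≤ PySem.Chars.find rest pvPatA := by
          have := PySem.Chars.neg_one_le_find rest pvPatA; omega
        obtain ⟨hpr, hminr⟩ := PySem.Chars.find_spec (s := rest) (sub := pvPatA) hger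
        set mt := (PySem.Chars.find rest pvPatA).toNat with hmtdef
        have hprl := hpr.length_le
        rw [h7, List.length_drop] at hprl
        have hmtlen : mt + 7 ≤ rest.length := by omega
        have hpiecesr : pieces rest = rest.take mt :: pieces (rest.drop (mt + 7)) :=
          pieces_occ mt rest hpr (fun i hi => hminr i hi)
        have hoccsr : occs rest = mt :: (occs (rest.drop (mt + 7))).map (· + (mt + 7)) := by
          rw [occs, dif_neg hfr]
        have htail : buildComA ds
            ((occs rest).map ((Nat.cast : Nat → Int) ∘ (fun x => x + (nn + 7))))
            = ((pieces (rest.drop (mt + 7))).dropLast).map (fun p => String.ofList (pvPatA ++ p)) := by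
          have hcomp : ((Nat.cast : Nat → Int) ∘ (fun x => x + (nn + 7))) = (fun x => ((x + (nn + 7) : Nat) : Int)) := by
            funext x; simp
          rw [hcomp, buildComA_shift ds (nn + 7) (occs rest), ← hrestdef,
              ihN rest hrestlen, hpiecesr, slice_one_neg_one]
        rw [hoccsr, List.map_cons] at htail ⊢
        simp only [buildComA]
        rw [htail]
        rw [hpiecesr, List.dropLast_cons_of_ne_nil (pieces_ne_nil _), List.map_cons]
        congr 1
        apply congrArg
        simp only [Function.comp_apply, PySem.Chars.slice_eq_listSlice]
        rw [show ((mt + (nn + 7) : Nat) : Int) = ((nn + (mt + 7) : Nat) : Int) from by push_cast; ring,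
            PySem.List.slice_natCast,
            show nn + (mt + 7) - nn = pvPatA.length + mt from by rw [h7]; omega,
            hdropPat, List.take_length_add_append]

-- ===== VERDICT (by name: the statement is the Claim_ definition above) =====
theorem CommitCutter_spec : Claim_equal_CommitCutter := by
  intro data _
  unfold Spec_CommitCutter
  rw [show CommitCutter data = buildComA data.toList (cutLoopA data.toList 0 (data.toList.length + 1)) from rfl,
      show CommitCutter_alt data = (PySem.List.slice (PySem.Chars.splitOn data.toList pvPatB) (some 1) (some (-1))).map (fun p => String.ofList (pvPatB ++ p)) from rfl,
      show pvPatB = pvPatA from rfl,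
      splitOn_eq_pieces, cutLoopA_eq_occs (data.toList.length + 1) data.toList (by omega)]
  exact main_aux data.toList.length data.toList le_rfl
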